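-- pv_equiv track=rewrite | github.com/Nexedi/erp5 | product/ERP5OOo/OOoUtils.py | _getReducedTable
-- ===== SOURCE A (Python) =====
-- def _getReducedTable(table):
--   """
--     Reduce the table to its minimum size
--   """
--   empty_lines = 0
--   no_more_empty_lines = 0
--
--   # Eliminate all empty cells at the ends of lines and columns
--   # Browse the table starting from the bottom for easy empty lines count
--   for line in range(len(table)-1, -1, -1):
--     empty_cells = 0
--     line_content = table[line]
--     for cell in range(len(line_content)-1, -1, -1):
--       if line_content[cell] in ('', None):
--         empty_cells += 1
--       else:
--         break
--
--     if (not no_more_empty_lines) and (empty_cells == len(line_content)):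
--       empty_lines += 1
--     else:
--       line_size = len(line_content) - empty_cells
--       table[line] = line_content[:line_size]
--       no_more_empty_lines = 1
--
--   table_height = len(table) - empty_lines
--
--   return table[:table_height]
-- ===== SOURCE B (Python) =====
-- def _getReducedTable(table):
--   """
--     Reduce the table to its minimum size (two independent passes;
--     mutates rows of `table` in place exactly like the original).
--   """
--   # Pass 1: find the index of the last non-empty row.
--   last = len(table) - 1
--   while last >= 0 and all(c in ('', None) for c in table[last]):
--     last -= 1
--
--   # Pass 2: strip trailing empty cells from every kept row, in place.
--   for i in range(last + 1):
--     row = table[i]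
--     size = len(row)
--     while size > 0 and row[size - 1] in ('', None):
--       size -= 1
--     table[i] = row[:size]
--
--   return table[:last + 1]
-- ===== Notes on version B (the rewrite author's own statement) =====
-- stated objective: simpler
-- what changed: replaces the single bottom-up pass with flag/counter state (empty_lines, no_more_empty_lines) by two independent stateless passes: first find the last non-empty row, then strip trailing empty cells from rows up to it
import Mathlib
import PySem

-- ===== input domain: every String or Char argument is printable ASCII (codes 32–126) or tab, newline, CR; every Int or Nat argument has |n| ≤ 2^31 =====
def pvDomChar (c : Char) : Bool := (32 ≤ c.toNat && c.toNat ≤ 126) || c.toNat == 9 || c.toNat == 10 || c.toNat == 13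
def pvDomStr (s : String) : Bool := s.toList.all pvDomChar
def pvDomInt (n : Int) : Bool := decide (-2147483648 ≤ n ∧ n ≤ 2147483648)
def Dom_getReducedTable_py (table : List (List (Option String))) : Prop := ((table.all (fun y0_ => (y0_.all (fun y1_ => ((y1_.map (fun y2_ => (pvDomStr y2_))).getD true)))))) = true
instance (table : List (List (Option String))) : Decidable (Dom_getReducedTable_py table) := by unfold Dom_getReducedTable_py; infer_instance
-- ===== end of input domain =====

-- B replaces A's single bottom-up pass with flag/counter state by two independent
-- stateless passes (find last non-empty row, then strip kept rows); equal return
-- value proved; both Pythons mutate kept rows of `table` in place identically.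


-- ===== PORT A =====
-- `cell in ('', None)` on an Option String cell
def isEmptyCell (c : Option String) : Bool := c == some "" || c == none

-- A's inner for-loop with break: count trailing empty cells, scanning from the end
-- (recursion over the reversed cell list)
def cntCellsRev : List (Option String) → Nat
  | [] => 0
  | c :: cs => if isEmptyCell c then cntCellsRev cs + 1 else 0

-- A's outer loop, bottom row first: state = (rewritten table, empty_lines, no_more_empty_lines)
def goA : List (List (Option String)) → (List (List (Option String)) × Nat × Bool)
  | [] => ([], 0, false)
  | row :: rest =>
    match goA rest with
    | (rest', el, nm) =>
      let ec := cntCellsRev row.reverse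
      if !nm && ec == row.length then
        (row :: rest', el + 1, nm)
      else
        (row.take (row.length - ec) :: rest', el, true)

def getReducedTable_py (table : List (List (Option String))) : List (List (Option String)) :=
  match goA table with
  | (t', el, _) => t'.take (table.length - el)

-- ===== PORT B =====
def emptyRowB (row : List (Option String)) : Bool := row.all isEmptyCell

-- B's first while loop: number of trailing all-empty rows (scanning from the bottom)
def cntRowsRev : List (List (Option String)) → Nat
  | [] => 0
  | r :: rs => if emptyRowB r then cntRowsRev rs + 1 else 0

-- B's second pass body: row[:size] after the size-decrementing while loop
def stripRowB (row : List (Option String)) : List (Option String) :=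
  row.take (row.length - cntCellsRev row.reverse)

def getReducedTable_py_alt (table : List (List (Option String))) : List (List (Option String)) :=
  let keep := table.length - cntRowsRev table.reverse
  (table.take keep).map stripRowB

-- ===== PRECONDITION & SPEC =====
def Spec_getReducedTable_py (table : List (List (Option String))) (out : List (List (Option String))) : Prop := out = getReducedTable_py_alt table
instance (table : List (List (Option String))) (out : List (List (Option String))) : Decidable (Spec_getReducedTable_py table out) := by unfold Spec_getReducedTable_py; infer_instance

-- ===== CLAIM (what is proved, stated in full; the proofs are below) =====
def Claim_equal_getReducedTable_py : Prop := ∀ (table : List (List (Option String))), Dom_getReducedTable_py table → Spec_getReducedTable_py table (getReducedTable_py table)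

-- ===== LEMMAS AND PROOFS =====

lemma cntCells_le (xs : List (Option String)) : cntCellsRev xs ≤ xs.length := by
  induction xs with
  | nil => simp [cntCellsRev]
  | cons c cs ih => simp only [cntCellsRev, List.length_cons]; split <;> omega

lemma cntCells_eq_iff (xs : List (Option String)) :
    cntCellsRev xs = xs.length ↔ xs.all isEmptyCell = true := by
  induction xs with
  | nil => simp [cntCellsRev]
  | cons c cs ih =>
    have hle := cntCells_le cs
    by_cases h : isEmptyCell c = true
    · have hred : cntCellsRev (c :: cs) = cntCellsRev cs + 1 := by simp [cntCellsRev, h]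
      rw [hred]
      simp only [List.length_cons, List.all_cons, h, Bool.true_and]
      constructor
      · intro he; exact ih.mp (by omega)
      · intro ha; have := ih.mpr ha; omega
    · have hred : cntCellsRev (c :: cs) = 0 := by simp [cntCellsRev, h]
      rw [hred]
      simp only [List.length_cons, List.all_cons, Bool.and_eq_true]
      constructor
      · intro he; omega
      · intro hb; exact absurd hb.1 h

lemma cntRows_le (xs : List (List (Option String))) : cntRowsRev xs ≤ xs.length := by
  induction xs with
  | nil => simp [cntRowsRev]
  | cons r rs ih => simp only [cntRowsRev, List.length_cons]; split <;> omega

lemma cntRows_append_single (xs : List (List (Option String))) (r : List (Option String)) :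
    cntRowsRev (xs ++ [r]) =
      if cntRowsRev xs = xs.length then cntRowsRev xs + (if emptyRowB r then 1 else 0)
      else cntRowsRev xs := by
  induction xs with
  | nil => cases hr : emptyRowB r <;> simp [cntRowsRev, hr]
  | cons x xs ih =>
    have hle := cntRows_le xs
    by_cases hx : emptyRowB x = true
    · simp only [List.cons_append, cntRowsRev, if_pos hx, ih, List.length_cons]
      by_cases h1 : cntRowsRev xs = xs.length
      · have h1' : cntRowsRev xs + 1 = xs.length + 1 := by omega
        simp only [if_pos h1, if_pos h1']
        cases hr : emptyRowB r <;> simp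
      · have h1' : ¬ (cntRowsRev xs + 1 = xs.length + 1) := by omega
        simp only [if_neg h1, if_neg h1']
    · have h0 : ¬ ((0:Nat) = xs.length + 1) := by omega
      simp only [List.cons_append, cntRowsRev, if_neg hx, List.length_cons, if_neg h0]

lemma emptyRow_beq (row : List (Option String)) :
    (cntCellsRev row.reverse == row.length) = emptyRowB row := by
  cases hr : emptyRowB row
  · have hne : cntCellsRev row.reverse ≠ row.length := by
      intro h
      have : row.reverse.all isEmptyCell = true :=
        (cntCells_eq_iff row.reverse).mp (by simpa using h)
      rw [List.all_reverse] at this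
      exact absurd this (by simpa [emptyRowB] using hr)
    simp [hne]
  · have : cntCellsRev row.reverse = row.length := by
      have h := (cntCells_eq_iff row.reverse).mpr
        (by rw [List.all_reverse]; simpa [emptyRowB] using hr)
      simpa using h
    simp [this]

-- the number of rows kept
def keepCnt (t : List (List (Option String))) : Nat := t.length - cntRowsRev t.reverse

lemma goA_spec (t : List (List (Option String))) :
    goA t = ((t.take (keepCnt t)).map stripRowB ++ t.drop (keepCnt t),
             t.length - keepCnt t, decide (0 < keepCnt t)) := by
  induction t with
  | nil => simp [goA, keepCnt, cntRowsRev]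
  | cons row rest ih =>
    have hle : cntRowsRev rest.reverse ≤ rest.length := by
      simpa using cntRows_le rest.reverse
    have hrev : (row :: rest).reverse = rest.reverse ++ [row] := by simp
    have hK := cntRows_append_single rest.reverse row
    rw [List.length_reverse] at hK
    simp only [goA, ih]
    by_cases hrest : cntRowsRev rest.reverse = rest.length
    · have hk0 : keepCnt rest = 0 := by unfold keepCnt; omega
      by_cases hrow : emptyRowB row = true
      · have hm : cntRowsRev (rest.reverse ++ [row]) = rest.length + 1 := by
          rw [hK]; simp [hrest, hrow]
        have hK0 : keepCnt (row :: rest) = 0 := by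
          unfold keepCnt; simp only [List.reverse_cons, hm, List.length_cons]; omega
        simp [hk0, hK0, emptyRow_beq, hrow]
      · have hm : cntRowsRev (rest.reverse ++ [row]) = rest.length := by
          rw [hK]; simp [hrest, hrow]
        have hK1 : keepCnt (row :: rest) = 1 := by
          unfold keepCnt; simp only [List.reverse_cons, hm, List.length_cons]; omega
        simp [hk0, hK1, emptyRow_beq, hrow, stripRowB]
    · have hkpos : 0 < keepCnt rest := by unfold keepCnt; omega
      have hm : cntRowsRev (rest.reverse ++ [row]) = cntRowsRev rest.reverse := by
        rw [hK]; simp [hrest]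
      have hKs : keepCnt (row :: rest) = keepCnt rest + 1 := by
        unfold keepCnt; simp only [List.reverse_cons, hm, List.length_cons]; omega
      have hnm : decide (0 < keepCnt rest) = true := by simpa using hkpos
      simp only [hnm, Bool.not_true, Bool.false_and, Bool.false_eq_true, if_false,
        hKs, List.take_succ_cons, List.map_cons, List.drop_succ_cons, List.length_cons]
      rw [show rest.length + 1 - (keepCnt rest + 1) = rest.length - keepCnt rest from by omega]
      simp [stripRowB]

-- ===== VERDICT (by name: the statement is the Claim_ definition above) =====
theorem getReducedTable_py_spec : Claim_equal_getReducedTable_py := by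
  intro table _
  show getReducedTable_py table = getReducedTable_py_alt table
  have hle : keepCnt table ≤ table.length := by unfold keepCnt; omega
  have hlen : (List.map stripRowB (List.take (keepCnt table) table)).length = keepCnt table := by
    simp [List.length_take]; omega
  have h2 : table.length - (table.length - keepCnt table) = keepCnt table := by omega
  unfold getReducedTable_py
  rw [goA_spec]
  simp only [h2]
  rw [List.take_left' hlen]
  rfl
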